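-- pv_equiv track=rewrite | github.com/jvirdi2/Python_3_practise | count_duplicates_and_concatenation.py | solution
-- ===== SOURCE A (Python) =====
-- from itertools import combinations
--
-- def solution(list_string):
--     len_list_string=len(list_string)
--     size=[]
--
--
--     for i in range(1,len_list_string):
--         current=list(combinations(list_string,i+1))
--         for j in current:
--             current_element=j
--             combined_string=''.join(current_element)
--
--             B={}
--             count=0
--             for m in combined_string:
--
--                 try:
--                     if B[m]>0:
--                         B[m]=B[m]+1
--                         if B[m]>=2:
--                             count=1
--                             size.append(0)
--                             break
--                 except:
--                     B[m]=1
--             if count==0: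
--                 size.append(len(combined_string))
--
--     return max(size)
-- ===== SOURCE B (Python) =====
-- def solution(list_string):
--     # Precompute per-string character sets, then DFS over subsets with
--     # incremental union + pruning instead of rebuilding/rescanning each combination.
--     infos = []
--     for s in list_string:
--         cs = set(s)
--         infos.append((cs, len(s), len(cs) == len(s)))
--
--     def dfs(rest, used, taken, length):
--         if not rest:
--             return length if taken >= 2 else 0
--         cs, l, ok = rest[0]
--         best = dfs(rest[1:], used, taken, length)
--         if ok and used.isdisjoint(cs):
--             cand = dfs(rest[1:], used | cs, taken + 1, length + l)
--             if cand > best: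
--                 best = cand
--         return best
--
--     return dfs(infos, set(), 0, 0)
-- ===== Notes on version B (the rewrite author's own statement) =====
-- stated objective: faster
-- what changed: Replaced per-size itertools.combinations enumeration with join-and-rescan duplicate counting by a subset DFS over precomputed per-string character sets with incremental union and pruning of conflicting branches.
-- outside the precondition, e.g. on solution([]): A raises ValueError, B returns 0
import Mathlib
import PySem

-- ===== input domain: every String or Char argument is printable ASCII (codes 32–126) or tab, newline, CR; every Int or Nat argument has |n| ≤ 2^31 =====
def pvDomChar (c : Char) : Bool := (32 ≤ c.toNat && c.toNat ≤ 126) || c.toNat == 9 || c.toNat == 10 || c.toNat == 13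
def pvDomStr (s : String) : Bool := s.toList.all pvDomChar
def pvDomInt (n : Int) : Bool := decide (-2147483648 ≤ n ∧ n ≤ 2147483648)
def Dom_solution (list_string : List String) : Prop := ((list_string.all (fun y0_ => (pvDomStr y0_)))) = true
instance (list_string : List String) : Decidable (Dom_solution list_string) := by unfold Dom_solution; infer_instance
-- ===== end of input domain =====

-- B replaces A's per-size combinations enumeration (join + dict rescan per subset) by a subset
-- DFS over precomputed per-string character sets with incremental union and pruning (objective: faster).

-- ===== PORT A =====
-- inner char loop of A: dict B counts characters; returns true iff the loop broke (count = 1)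
def dupScan : List Char → PySem.Dict Char Int → Bool
  | [], _ => false
  | m :: rest, B =>
    match B.get? m with                    -- try: B[m]
    | some v =>
      if v > 0 then
        -- B[m] = B[m] + 1; if B[m] >= 2: count = 1; break
        if v + 1 ≥ 2 then true else dupScan rest (B.insert m (v + 1))
      else dupScan rest B
    | none => dupScan rest (B.insert m 1)  -- except: B[m] = 1

def solution (list_string : List String) : Int :=
  let len_list_string : Int := list_string.length
  let size : List Int :=
    (PySem.List.pyRange 1 len_list_string 1).foldl (fun size i =>
      (PySem.List.combinations list_string (i + 1).toNat).foldl (fun size j =>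
        let combined_string := PySem.Str.join "" j
        if dupScan combined_string.toList PySem.Dict.empty then
          size ++ [0]
        else
          size ++ [PySem.Str.len combined_string]) size) []
  (PySem.List.max? size (fun x => x)).getD 0   -- max(size); none = ValueError, excluded by Pre_

-- ===== PORT B =====
def dfsB : List (PySem.Set Char × Int × Bool) → PySem.Set Char → Int → Int → Int
  | [], _, taken, length => if taken ≥ 2 then length else 0
  | (cs, l, ok) :: rest, used, taken, length =>
    let best := dfsB rest used taken length
    if ok && PySem.Set.isdisjoint used cs then
      let cand := dfsB rest (PySem.Set.union used cs) (taken + 1) (length + l)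
      if cand > best then cand else best
    else best

def solution_alt (list_string : List String) : Int :=
  let infos : List (PySem.Set Char × Int × Bool) :=
    list_string.map (fun s =>
      let cs : PySem.Set Char := PySem.Set.ofList s.toList
      (cs, PySem.Str.len s, PySem.Set.len cs == PySem.Str.len s))
  dfsB infos PySem.Set.empty 0 0

-- ===== PRECONDITION & SPEC =====
-- Pre_ excludes only lists of fewer than 2 strings, on which A's max([]) raises ValueError.
def Pre_solution (list_string : List String) : Prop := 2 ≤ list_string.length
instance (list_string : List String) : Decidable (Pre_solution list_string) := by unfold Pre_solution; infer_instance
def pvWitness_solution : List String := ["a", "b"]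

def Spec_solution (list_string : List String) (out : Int) : Prop := out = solution_alt list_string
instance (list_string : List String) (out : Int) : Decidable (Spec_solution list_string out) := by unfold Spec_solution; infer_instance

-- ===== CLAIM (what is proved, stated in full; the proofs are below) =====
def Claim_equal_solution : Prop := ∀ (list_string : List String), Dom_solution list_string → Pre_solution list_string → Spec_solution list_string (solution list_string)

-- ===== LEMMAS AND PROOFS =====

-- the running max with base 0 (all scores are ≥ 0)
def M (xs : List Int) : Int := xs.foldl max 0

theorem M_nonneg (xs : List Int) : 0 ≤ M xs := (PySem.List.le_foldl_max xs 0).1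

theorem le_M {xs : List Int} {x : Int} (h : x ∈ xs) : x ≤ M xs :=
  (PySem.List.le_foldl_max xs 0).2 x h

theorem M_le {xs : List Int} {c : Int} (hc : 0 ≤ c) (h : ∀ x ∈ xs, x ≤ c) : M xs ≤ c := by
  rcases PySem.List.foldl_max_mem xs 0 with h0 | hm
  · rw [M, h0]; exact hc
  · exact h _ hm

theorem M_eq {xs ys : List Int} (h1 : ∀ x ∈ xs, x ≤ M ys) (h2 : ∀ y ∈ ys, y ≤ M xs) :
    M xs = M ys :=
  le_antisymm (M_le (M_nonneg ys) h1) (M_le (M_nonneg xs) h2)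

theorem M_append (xs ys : List Int) : M (xs ++ ys) = max (M xs) (M ys) := by
  apply le_antisymm
  · exact M_le (le_max_of_le_left (M_nonneg xs)) (by
      intro x hx
      rcases List.mem_append.mp hx with h | h
      · exact le_max_of_le_left (le_M h)
      · exact le_max_of_le_right (le_M h))
  · exact max_le (M_le (M_nonneg _) fun x hx => le_M (List.mem_append.mpr (Or.inl hx)))
      (M_le (M_nonneg _) fun x hx => le_M (List.mem_append.mpr (Or.inr hx)))

theorem M_singleton {x : Int} (h : 0 ≤ x) : M [x] = x := by
  simp [M, h]

-- dupScan detects exactly a repeated character (dict values are always ≥ 1)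
theorem dupScan_iff (cs : List Char) (d : PySem.Dict Char Int)
    (hd : ∀ c v, d.get? c = some v → 1 ≤ v) :
    dupScan cs d = true ↔ ¬ cs.Nodup ∨ ∃ c ∈ cs, (d.get? c).isSome := by
  induction cs generalizing d with
  | nil => simp [dupScan]
  | cons m rest ih =>
    rw [dupScan]
    cases h : d.get? m with
    | some v =>
      have hv := hd m v h
      simp only [show (v > 0) = True by simp [lt_of_lt_of_le one_pos hv], if_true]
      rw [if_pos (by omega)]
      simp only [true_iff]
      exact Or.inr ⟨m, List.mem_cons_self, by simp [h]⟩
    | none =>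
      rw [ih _ (fun c w hc => by
        rw [PySem.Dict.get?_insert] at hc
        split at hc
        · simp_all
        · exact hd c w hc)]
      constructor
      · rintro (hnd | ⟨c, hc, hs⟩)
        · exact Or.inl (by simp [List.nodup_cons]; intro _; exact hnd)
        · rw [PySem.Dict.get?_insert] at hs
          by_cases hcm : c = m
          · exact Or.inl (by simp [List.nodup_cons, hcm ▸ hc])
          · exact Or.inr ⟨c, List.mem_cons_of_mem _ hc, by rwa [if_neg hcm] at hs⟩
      · rintro (hnd | ⟨c, hc, hs⟩)
        · rw [List.nodup_cons] at hnd
          push Not at hnd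
          by_cases hm : m ∈ rest
          · exact Or.inr ⟨m, hm, by simp⟩
          · exact Or.inl (hnd hm)
        · rcases List.mem_cons.mp hc with rfl | hc'
          · rw [h] at hs; simp at hs
          · exact Or.inr ⟨c, hc', by rw [PySem.Dict.get?_insert]; split <;> simp [hs]⟩

theorem dupScan_empty (cs : List Char) :
    dupScan cs PySem.Dict.empty = !decide cs.Nodup := by
  have h := dupScan_iff cs PySem.Dict.empty (by simp [PySem.Dict.get?_empty])
  simp only [PySem.Dict.get?_empty] at h
  simp only [Option.isSome_none] at h
  cases hb : dupScan cs PySem.Dict.empty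
  · simp only [hb, Bool.false_eq] at *
    have : ¬(¬ cs.Nodup ∨ ∃ c ∈ cs, False = true) := fun hc => by simp_all
    simp at this ⊢
    exact this
  · have := h.mp hb
    simp at this ⊢
    exact this

theorem intercalate_nil_flat (ls : List (List Char)) : List.intercalate [] ls = ls.flatten := by
  induction ls with
  | nil => rfl
  | cons a t ih =>
    cases t with
    | nil => simp [List.intercalate]
    | cons b t' =>
      simp only [List.intercalate, List.intersperse] at *
      simp_all

-- the joined combination, as a list of characters
theorem toList_join_empty (j : List String) :
    (PySem.Str.join "" j).toList = (j.map String.toList).flatten := by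
  simp [PySem.Str.toList_join, PySem.Chars.join, intercalate_nil_flat]

-- A's score of one combination
def scoreA (T : List String) : Int :=
  if (T.map String.toList).flatten.Nodup then ((T.map String.toList).flatten.length : Int) else 0

-- A's size list, flattened
def sizeList (l : List String) : List Int :=
  (PySem.List.pyRange 1 (l.length : Int) 1).flatMap
    (fun i => (PySem.List.combinations l (i + 1).toNat).map scoreA)

theorem solution_eq (l : List String) :
    solution l = (PySem.List.max? (sizeList l) (fun x => x)).getD 0 := by
  have hlen : ∀ (j : List String),
      PySem.Str.len (PySem.Str.join "" j) = ((j.map String.toList).flatten.length : Int) := by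
    intro j
    rw [PySem.Str.len_eq, ← toList_join_empty]
  have hinner : ∀ (j : List String) (size : List Int),
      (if dupScan (PySem.Str.join "" j).toList PySem.Dict.empty then size ++ [0]
       else size ++ [PySem.Str.len (PySem.Str.join "" j)]) = size ++ [scoreA j] := by
    intro j size
    rw [dupScan_empty, toList_join_empty, scoreA, hlen]
    by_cases h : ((j.map String.toList).flatten).Nodup
    · rw [if_neg (by simp [h]), if_pos h]
    · rw [if_pos (by simp [h]), if_neg h]
  unfold solution sizeList
  dsimp only
  rw [show (fun (size : List Int) (i : Int) =>
        (PySem.List.combinations l (i + 1).toNat).foldl (fun size j =>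
          if dupScan (PySem.Str.join "" j).toList PySem.Dict.empty then size ++ [0]
          else size ++ [PySem.Str.len (PySem.Str.join "" j)]) size)
      = (fun (size : List Int) (i : Int) =>
          size ++ ((PySem.List.combinations l (i + 1).toNat).map scoreA)) from
    funext fun size => funext fun i => by
      exact (PySem.List.foldl_congr_mem
        (g := fun (acc : List Int) (j : List String) => acc ++ [scoreA j])
        _ _ _ (fun acc x _ => hinner x acc)).trans
        (by rw [PySem.List.foldl_append_singleton_eq_map])]
  rw [PySem.List.foldl_append_eq_flatMap]
  simp

theorem mem_sizeList {l : List String} {v : Int} :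
    v ∈ sizeList l ↔ ∃ T, T.Sublist l ∧ 2 ≤ T.length ∧ v = scoreA T := by
  unfold sizeList
  rw [List.mem_flatMap]
  constructor
  · rintro ⟨i, hi, hv⟩
    rw [PySem.List.mem_pyRange_one] at hi
    rw [List.mem_map] at hv
    rcases hv with ⟨T, hT, rfl⟩
    rw [PySem.List.mem_combinations_iff] at hT
    refine ⟨T, hT.1, ?_, rfl⟩
    have := hT.2
    omega
  · rintro ⟨T, hsub, hlen, rfl⟩
    have hle : T.length ≤ l.length := hsub.length_le
    refine ⟨((T.length : Int) - 1), ?_, ?_⟩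
    · rw [PySem.List.mem_pyRange_one]; exact ⟨by omega, by omega⟩
    · rw [List.mem_map]
      exact ⟨T, by rw [PySem.List.mem_combinations_iff]; exact ⟨hsub, by omega⟩, rfl⟩

def infoOf (s : String) : PySem.Set Char × Int × Bool :=
  (PySem.Set.ofList s.toList, PySem.Str.len s,
    PySem.Set.len (PySem.Set.ofList s.toList) == PySem.Str.len s)

-- all compatible subsets of infos, as (count, total length) pairs
def subsC : List (PySem.Set Char × Int × Bool) → PySem.Set Char → List (Int × Int)
  | [], _ => [(0, 0)]
  | (cs, l, ok) :: rest, used =>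
    subsC rest used ++
      (if ok && PySem.Set.isdisjoint used cs then
        (subsC rest (PySem.Set.union used cs)).map (fun p => (p.1 + 1, p.2 + l))
      else [])

def Compat : PySem.Set Char → List (PySem.Set Char × Int × Bool) → Prop
  | _, [] => True
  | used, (cs, _, ok) :: rest =>
    (ok && PySem.Set.isdisjoint used cs) = true ∧ Compat (PySem.Set.union used cs) rest

theorem dfsB_eq (infos : List (PySem.Set Char × Int × Bool)) (used : PySem.Set Char)
    (taken len : Int) (hlen : 0 ≤ len) (hinfos : ∀ p ∈ infos, 0 ≤ p.2.1) :
    dfsB infos used taken len =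
      M ((subsC infos used).map (fun p => if 2 ≤ taken + p.1 then len + p.2 else 0)) := by
  induction infos generalizing used taken len with
  | nil =>
    rw [dfsB, subsC]
    simp only [List.map_cons, List.map_nil]
    rw [M_singleton (by split <;> omega)]
    split <;> split <;> omega
  | cons x rest ih =>
    obtain ⟨cs, l, ok⟩ := x
    have hl : 0 ≤ l := hinfos (cs, l, ok) List.mem_cons_self
    have hrest : ∀ p ∈ rest, 0 ≤ p.2.1 := fun p hp => hinfos p (List.mem_cons_of_mem _ hp)
    rw [dfsB, subsC]
    cases hcond : (ok && PySem.Set.isdisjoint used cs) with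
    | false =>
      simp only [Bool.false_eq_true, if_false, List.append_nil]
      exact ih used taken len hlen hrest
    | true =>
      simp only [reduceIte]
      rw [List.map_append, M_append]
      rw [← ih used taken len hlen hrest]
      rw [List.map_map]
      have : ((fun p : Int × Int => if 2 ≤ taken + p.1 then len + p.2 else 0) ∘
          (fun p : Int × Int => (p.1 + 1, p.2 + l)))
          = (fun p : Int × Int => if 2 ≤ (taken + 1) + p.1 then (len + l) + p.2 else 0) := by
        funext p
        simp only [Function.comp]
        split <;> split <;> omega
      rw [this, ← ih (PySem.Set.union used cs) (taken + 1) (len + l) (by omega) hrest]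
      rcases le_or_gt (dfsB rest (PySem.Set.union used cs) (taken + 1) (len + l))
        (dfsB rest used taken len) with h | h
      · rw [if_neg (by omega), max_eq_left h]
      · rw [if_pos (by omega), max_eq_right (le_of_lt h)]

theorem mem_subsC (infos : List (PySem.Set Char × Int × Bool)) (used : PySem.Set Char)
    (p : Int × Int) :
    p ∈ subsC infos used ↔
      ∃ T, T.Sublist infos ∧ Compat used T ∧ p = ((T.length : Int), (T.map (·.2.1)).sum) := by
  induction infos generalizing used p with
  | nil =>
    simp only [subsC, List.mem_singleton]
    constructor
    · rintro rfl
      exact ⟨[], List.Sublist.refl _, trivial, rfl⟩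
    · rintro ⟨T, hT, _, rfl⟩
      simp [List.sublist_nil.mp hT]
  | cons x rest ih =>
    obtain ⟨cs, l, ok⟩ := x
    rw [subsC, List.mem_append]
    constructor
    · rintro (h | h)
      · rcases (ih used p).mp h with ⟨T, hsub, hc, rfl⟩
        exact ⟨T, hsub.trans (List.sublist_cons_self _ _), hc, rfl⟩
      · split at h
        · rw [List.mem_map] at h
          rcases h with ⟨q, hq, rfl⟩
          rcases (ih _ q).mp hq with ⟨T, hsub, hc, rfl⟩
          refine ⟨(cs, l, ok) :: T, List.cons_sublist_cons.mpr hsub, ⟨by assumption, hc⟩, ?_⟩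
          simp [add_comm]
        · simp at h
    · rintro ⟨T, hsub, hc, rfl⟩
      rcases List.sublist_cons_iff.mp hsub with h | ⟨r, rfl, hr⟩
      · exact Or.inl ((ih used _).mpr ⟨T, h, hc, rfl⟩)
      · right
        obtain ⟨hcond, hc'⟩ := hc
        rw [if_pos hcond, List.mem_map]
        refine ⟨((r.length : Int), (r.map (·.2.1)).sum), (ih _ _).mpr ⟨r, hr, hc', rfl⟩, ?_⟩
        simp [add_comm]

theorem ok_iff (s : String) :
    (PySem.Set.len (PySem.Set.ofList s.toList) == PySem.Str.len s) = true ↔ s.toList.Nodup := by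
  rw [beq_iff_eq, PySem.Str.len_eq]
  rw [show (PySem.Set.len (PySem.Set.ofList s.toList)) = ((PySem.Set.ofList s.toList).length : Int) from rfl]
  constructor
  · intro h
    have hlen : (PySem.Set.ofList s.toList).length = s.toList.length := by exact_mod_cast h
    have hnd := PySem.Set.nodup_ofList (xs := s.toList)
    have hsub : (PySem.Set.ofList s.toList) ⊆ s.toList := fun {c} hc =>
      (PySem.Set.mem_ofList _ _).mp hc
    have hperm := (List.subperm_of_subset hnd hsub).perm_of_length_le (by omega)
    exact (hperm.nodup_iff).mp hnd
  · intro h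
    rw [PySem.Set.ofList_eq_self_of_nodup _ h]

theorem compat_iff (T : List String) (used : PySem.Set Char) :
    Compat used (T.map infoOf) ↔
      ((T.map String.toList).flatten.Nodup ∧ ∀ c ∈ (T.map String.toList).flatten, c ∉ used) := by
  induction T generalizing used with
  | nil => simp [Compat]
  | cons s T ih =>
    simp only [List.map_cons, List.flatten_cons]
    rw [show Compat used (infoOf s :: T.map infoOf) ↔
        ((infoOf s).2.2 && PySem.Set.isdisjoint used (infoOf s).1) = true ∧
          Compat (PySem.Set.union used (infoOf s).1) (T.map infoOf) from Iff.rfl]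
    simp only [infoOf]
    rw [ih, Bool.and_eq_true, ok_iff, PySem.Set.isdisjoint_iff]
    constructor
    · rintro ⟨⟨hnds, hdisj⟩, hndf, hnotin⟩
      have hnotin' : ∀ c ∈ (List.map String.toList T).flatten, c ∉ used ∧ c ∉ s.toList := by
        intro c hc
        have hthis := hnotin c hc
        rw [PySem.Set.mem_union] at hthis
        constructor
        · intro hu; exact hthis (Or.inl hu)
        · intro hs; exact hthis (Or.inr ((PySem.Set.mem_ofList _ _).mpr hs))
      refine ⟨List.nodup_append.mpr ⟨hnds, hndf, ?_⟩, ?_⟩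
      · intro c hcs d hdf heq
        subst heq
        exact (hnotin' c hdf).2 hcs
      · intro c hc
        rcases List.mem_append.mp hc with h | h
        · intro hu; exact hdisj c hu ((PySem.Set.mem_ofList _ _).mpr h)
        · exact (hnotin' c h).1
    · rintro ⟨hnd, hnotin⟩
      rw [List.nodup_append] at hnd
      obtain ⟨hnds, hndf, hdisj⟩ := hnd
      refine ⟨⟨hnds, ?_⟩, hndf, ?_⟩
      · intro c hcu hcs
        exact hnotin c (List.mem_append.mpr (Or.inl ((PySem.Set.mem_ofList _ _).mp hcs))) hcu
      · intro c hc
        rw [PySem.Set.mem_union]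
        rintro (hu | hs)
        · exact hnotin c (List.mem_append.mpr (Or.inr hc)) hu
        · exact hdisj c ((PySem.Set.mem_ofList _ _).mp hs) c hc rfl

theorem sumLen_eq (T : List String) :
    ((T.map infoOf).map (·.2.1)).sum = ((T.map String.toList).flatten.length : Int) := by
  induction T with
  | nil => simp
  | cons s t ih =>
    simp only [List.map_cons, List.flatten_cons, List.sum_cons, List.length_append, ih]
    rw [show (infoOf s).2.1 = PySem.Str.len s from rfl, PySem.Str.len_eq]
    push_cast
    ring

theorem solution_alt_eq (l : List String) :
    solution_alt l =
      M ((subsC (l.map infoOf) PySem.Set.empty).map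
        (fun p => if 2 ≤ p.1 then p.2 else 0)) := by
  unfold solution_alt
  dsimp only
  rw [show (fun s => (PySem.Set.ofList s.toList, PySem.Str.len s,
      PySem.Set.len (PySem.Set.ofList s.toList) == PySem.Str.len s)) = infoOf from rfl]
  rw [dfsB_eq _ _ _ _ le_rfl (by
    intro p hp
    rw [List.mem_map] at hp
    rcases hp with ⟨s, _, rfl⟩
    rw [show (infoOf s).2.1 = PySem.Str.len s from rfl, PySem.Str.len_eq]
    positivity)]
  congr 1
  apply List.map_congr_left
  intro p _
  norm_num

theorem scoreA_nonneg (T : List String) : 0 ≤ scoreA T := by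
  unfold scoreA; split <;> positivity

theorem solution_spec_main (l : List String) (hpre : 2 ≤ l.length) :
    (PySem.List.max? (sizeList l) (fun x => x)).getD 0 = solution_alt l := by
  -- A's value is M (sizeList l)
  have hnonneg : ∀ v ∈ sizeList l, (0:Int) ≤ v := by
    intro v hv
    rcases mem_sizeList.mp hv with ⟨T, _, _, rfl⟩
    exact scoreA_nonneg T
  have hne : sizeList l ≠ [] := by
    obtain ⟨a, b, t, rfl⟩ : ∃ a b t, l = a :: b :: t := by
      cases l with
      | nil => simp at hpre
      | cons a l' => cases l' with
        | nil => simp at hpre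
        | cons b t => exact ⟨a, b, t, rfl⟩
    intro h
    have : scoreA [a, b] ∈ sizeList (a :: b :: t) := mem_sizeList.mpr
      ⟨[a, b], by simp [List.cons_sublist_cons], by simp, rfl⟩
    simp [h] at this
  have hA : (PySem.List.max? (sizeList l) (fun x => x)).getD 0 = M (sizeList l) := by
    cases hsz : sizeList l with
    | nil => exact absurd hsz hne
    | cons x t =>
      rw [PySem.List.max?_id_cons, Option.getD_some, M]
      have hx : (0:Int) ≤ x := hnonneg x (by rw [hsz]; exact List.mem_cons_self)
      simp [max_eq_right hx]
  rw [hA, solution_alt_eq]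
  apply M_eq
  · -- every A-score is ≤ B's max
    intro v hv
    rcases mem_sizeList.mp hv with ⟨T, hsub, hlen2, rfl⟩
    unfold scoreA
    split
    case isTrue hn =>
      apply le_M
      rw [List.mem_map]
      refine ⟨((T.length : Int), ((T.map String.toList).flatten.length : Int)), ?_, ?_⟩
      · rw [mem_subsC]
        refine ⟨T.map infoOf, hsub.map infoOf, ?_, ?_⟩
        · rw [compat_iff]
          exact ⟨hn, by simp [PySem.Set.empty]⟩
        · rw [List.length_map, sumLen_eq]
      · simp only []
        rw [if_pos (by exact_mod_cast hlen2)]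
    case isFalse => exact M_nonneg _
  · -- every B-score is ≤ A's max
    intro y hy
    rw [List.mem_map] at hy
    rcases hy with ⟨p, hp, rfl⟩
    rw [mem_subsC] at hp
    rcases hp with ⟨T', hsub', hcompat, rfl⟩
    rcases List.sublist_map_iff.mp hsub' with ⟨T, hsub, rfl⟩
    rw [compat_iff] at hcompat
    simp only [List.length_map, sumLen_eq]
    by_cases h2 : 2 ≤ T.length
    · rw [if_pos (by exact_mod_cast h2)]
      apply le_M
      apply mem_sizeList.mpr
      exact ⟨T, hsub, h2, by rw [scoreA, if_pos hcompat.1]⟩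
    · rw [if_neg (by omega)]
      exact M_nonneg _

-- ===== VERDICT (by name: the statement is the Claim_ definition above) =====
theorem solution_spec : Claim_equal_solution := by
  intro l _ hpre
  unfold Pre_solution at hpre
  unfold Spec_solution
  rw [solution_eq]
  exact solution_spec_main l hpre
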